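-- pv_equiv track=rewrite | github.com/wilmurillo-ai/Design-Assistant | .skills/openclaw-skills/skills/allenfancy-gan/ima-seedance2-video-generator/scripts/ima_media_utils.py | classify_media_inputs
-- ===== SOURCE A (Python) =====
-- from typing import Dict, List, Literal, Optional, Tuple
--
-- def classify_media_inputs(urls_with_metadata: List[Dict]) -> Tuple[List[Dict], List[Dict], List[Dict]]:
--     """
--     Classify processed media into images, videos, and audio.
--
--     Args:
--         urls_with_metadata: List of dicts with {"url": str, "type": str, ...metadata}
--
--     Returns:
--         (images, videos, audios) - three lists of metadata dicts
--     """
--     images = []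
--     videos = []
--     audios = []
--
--     for item in urls_with_metadata:
--         media_type = item.get("type", "unknown")
--         # Remove "type" key before adding to result (not needed in API)
--         metadata = {k: v for k, v in item.items() if k != "type"}
--
--         if media_type == "image":
--             images.append(metadata)
--         elif media_type == "video":
--             videos.append(metadata)
--         elif media_type == "audio":
--             audios.append(metadata)
--
--     return (images, videos, audios)
-- ===== SOURCE B (Python) =====
-- def classify_media_inputs(urls_with_metadata):
--     images = [{k: v for k, v in item.items() if k != "type"}
--               for item in urls_with_metadata if item.get("type") == "image"]
--     videos = [{k: v for k, v in item.items() if k != "type"}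
--               for item in urls_with_metadata if item.get("type") == "video"]
--     audios = [{k: v for k, v in item.items() if k != "type"}
--               for item in urls_with_metadata if item.get("type") == "audio"]
--     return (images, videos, audios)
-- ===== Notes on version B (the rewrite author's own statement) =====
-- stated objective: idiomatic
-- what changed: Replaces the single accumulating pass with if/elif dispatch and three mutable accumulators by three independent filtered list comprehensions, one per media type.
import Mathlib
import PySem

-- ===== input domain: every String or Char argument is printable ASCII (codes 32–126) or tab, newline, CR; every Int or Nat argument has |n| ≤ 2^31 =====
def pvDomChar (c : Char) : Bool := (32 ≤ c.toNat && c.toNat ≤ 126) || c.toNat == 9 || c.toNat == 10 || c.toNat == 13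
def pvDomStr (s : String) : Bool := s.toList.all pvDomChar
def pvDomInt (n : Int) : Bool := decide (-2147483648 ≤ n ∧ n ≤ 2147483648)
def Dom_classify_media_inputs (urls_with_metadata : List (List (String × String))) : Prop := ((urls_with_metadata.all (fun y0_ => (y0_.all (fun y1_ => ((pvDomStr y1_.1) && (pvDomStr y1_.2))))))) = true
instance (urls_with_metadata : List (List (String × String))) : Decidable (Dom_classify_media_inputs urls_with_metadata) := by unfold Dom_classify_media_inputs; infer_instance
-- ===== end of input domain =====

-- B: three independent filtered list comprehensions (one per media type) instead of A's single accumulating pass with if/elif dispatch; return value only.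


-- ===== PORT A =====
-- loop body of A, named so the equivalence proof can reason about one step at a time
def pvStepA (acc : (List (List (String × String))) × (List (List (String × String))) × (List (List (String × String)))) (item : List (String × String)) : (List (List (String × String))) × (List (List (String × String))) × (List (List (String × String))) :=
  let media_type := PySem.Dict.getD (PySem.Dict.mk item) "type" "unknown"
  let metadata := item.filter (fun kv => kv.1 != "type")
  if media_type = "image" then (acc.1 ++ [metadata], acc.2.1, acc.2.2)
  else if media_type = "video" then (acc.1, acc.2.1 ++ [metadata], acc.2.2)
  else if media_type = "audio" then (acc.1, acc.2.1, acc.2.2 ++ [metadata])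
  else acc

def classify_media_inputs (urls_with_metadata : List (List (String × String))) : (List (List (String × String))) × (List (List (String × String))) × (List (List (String × String))) :=
  urls_with_metadata.foldl pvStepA ([], [], [])

-- ===== PORT B =====
def pvStrip (item : List (String × String)) : List (String × String) :=
  item.filter (fun kv => kv.1 != "type")

def pvHasType (t : String) (item : List (String × String)) : Bool :=
  PySem.Dict.get? (PySem.Dict.mk item) "type" == some t

def classify_media_inputs_alt (urls_with_metadata : List (List (String × String))) : (List (List (String × String))) × (List (List (String × String))) × (List (List (String × String))) :=
  ((urls_with_metadata.filter (pvHasType "image")).map pvStrip,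
   (urls_with_metadata.filter (pvHasType "video")).map pvStrip,
   (urls_with_metadata.filter (pvHasType "audio")).map pvStrip)

-- ===== PRECONDITION & SPEC =====
def Spec_classify_media_inputs (urls_with_metadata : List (List (String × String))) (out : (List (List (String × String))) × (List (List (String × String))) × (List (List (String × String)))) : Prop := out = classify_media_inputs_alt urls_with_metadata
instance (urls_with_metadata : List (List (String × String))) (out : (List (List (String × String))) × (List (List (String × String))) × (List (List (String × String)))) : Decidable (Spec_classify_media_inputs urls_with_metadata out) := by unfold Spec_classify_media_inputs; infer_instance

-- ===== CLAIM (what is proved, stated in full; the proofs are below) =====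
def Claim_equal_classify_media_inputs : Prop := ∀ (urls_with_metadata : List (List (String × String))), Dom_classify_media_inputs urls_with_metadata → Spec_classify_media_inputs urls_with_metadata (classify_media_inputs urls_with_metadata)

-- ===== LEMMAS AND PROOFS =====

-- ===== VERDICT (by name: the statement is the Claim_ definition above) =====
lemma classify_loop (l : List (List (String × String)))
    (a b c : List (List (String × String))) :
    l.foldl pvStepA (a, b, c)
    = (a ++ (l.filter (pvHasType "image")).map pvStrip,
       b ++ (l.filter (pvHasType "video")).map pvStrip,
       c ++ (l.filter (pvHasType "audio")).map pvStrip) := by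
  induction l generalizing a b c with
  | nil => simp
  | cons item rest ih =>
    simp only [List.foldl_cons, List.filter_cons]
    cases hg : PySem.Dict.get? (PySem.Dict.mk item) "type" with
    | none =>
      have hs : pvStepA (a, b, c) item = (a, b, c) := by
        simp [pvStepA, PySem.Dict.getD, hg]
      rw [hs, ih]
      simp [pvHasType, hg]
    | some t =>
      by_cases h1 : t = "image"
      · have hs : pvStepA (a, b, c) item = (a ++ [pvStrip item], b, c) := by
          simp [pvStepA, PySem.Dict.getD, hg, h1, pvStrip]
        rw [hs, ih]
        simp [pvHasType, hg, h1]
      · by_cases h2 : t = "video"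
        · have hs : pvStepA (a, b, c) item = (a, b ++ [pvStrip item], c) := by
            simp [pvStepA, PySem.Dict.getD, hg, h2, pvStrip]
          rw [hs, ih]
          simp [pvHasType, hg, h2]
        · by_cases h3 : t = "audio"
          · have hs : pvStepA (a, b, c) item = (a, b, c ++ [pvStrip item]) := by
              simp [pvStepA, PySem.Dict.getD, hg, h3, pvStrip]
            rw [hs, ih]
            simp [pvHasType, hg, h3]
          · have hs : pvStepA (a, b, c) item = (a, b, c) := by
              simp [pvStepA, PySem.Dict.getD, hg, h1, h2, h3]
            rw [hs, ih]
            simp [pvHasType, hg, h1, h2, h3]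

theorem classify_media_inputs_spec : Claim_equal_classify_media_inputs := by
  intro l _
  unfold Spec_classify_media_inputs classify_media_inputs classify_media_inputs_alt
  simpa using classify_loop l [] [] []
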